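-- pv_equiv track=rewrite | github.com/powellquiring/wordle | w.py | subset_bool
-- ===== SOURCE A (Python) =====
-- def subset_bool(left: str, right_in: str):
--   """Return true if the left is completely contained in right"""
--   right = str(right_in)
--   for l in left:
--     if (i := right.find(l)) >= 0:
--       right = right[:i] + right[i+1:]
--     else:
--       return (False, "") # left item not in right
--   return (True, right)
-- ===== SOURCE B (Python) =====
-- def subset_bool(left: str, right_in: str):
--   """Return true if the left is completely contained in right"""
--   need = {}
--   for c in left:
--     need[c] = need.get(c, 0) + 1
--   out = []
--   for ch in right_in:
--     n = need.get(ch, 0)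
--     if n:
--       need[ch] = n - 1
--     else:
--       out.append(ch)
--   if any(need.values()):
--     return (False, "")
--   return (True, "".join(out))
-- ===== Notes on version B (the rewrite author's own statement) =====
-- stated objective: faster
-- what changed: Replaced A's repeated find-and-slice of right (a fresh string per char of left) by a single counting pass: build a need-counter over left, then one pass over right consuming needs and collecting unconsumed chars.
import Mathlib
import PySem

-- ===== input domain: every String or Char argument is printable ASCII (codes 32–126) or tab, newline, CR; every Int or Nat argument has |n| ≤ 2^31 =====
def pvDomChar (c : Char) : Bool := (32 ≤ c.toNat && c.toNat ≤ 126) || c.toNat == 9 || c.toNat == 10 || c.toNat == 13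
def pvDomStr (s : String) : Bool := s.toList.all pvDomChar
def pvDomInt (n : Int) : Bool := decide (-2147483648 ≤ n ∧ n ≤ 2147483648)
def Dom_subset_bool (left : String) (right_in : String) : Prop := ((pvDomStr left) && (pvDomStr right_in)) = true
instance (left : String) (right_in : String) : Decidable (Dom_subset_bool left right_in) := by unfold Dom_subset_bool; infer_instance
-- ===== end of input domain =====

-- B replaces A's repeated find-and-slice over `right` by a one-pass need-counter consumption (measurably faster: O(L+R) vs A's O(L*R)).


-- ===== PORT A =====
-- the for-loop over left with its early return, as structural recursion
def subsetLoopA : List Char → List Char → Bool × List Char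
  | [], right => (true, right)
  | l :: ls, right =>
      let i := PySem.Chars.find right [l]          -- right.find(l)
      if 0 ≤ i then
        subsetLoopA ls (PySem.List.slice right none (some i) ++ PySem.List.slice right (some (i + 1)) none)  -- right = right[:i] + right[i+1:]
      else
        (false, [])                                 -- return (False, "")

def subset_bool (left : String) (right_in : String) : Bool × String :=
  let r := subsetLoopA left.toList right_in.toList  -- right = str(right_in) is the identity on str arguments
  (r.1, String.ofList r.2)

-- ===== PORT B =====
def subset_bool_alt (left : String) (right_in : String) : Bool × String :=
  -- need[c] = need.get(c, 0) + 1 over left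
  let need := left.toList.foldl (fun d c => d.insert c (d.getD c 0 + 1)) (PySem.Dict.empty : PySem.Dict Char Int)
  -- one pass over right_in consuming needs, collecting unconsumed chars
  let st := right_in.toList.foldl
      (fun (st : PySem.Dict Char Int × List Char) ch =>
        let n := st.1.getD ch 0
        if n ≠ 0 then (st.1.insert ch (n - 1), st.2) else (st.1, st.2 ++ [ch]))
      (need, [])
  if st.1.values.any (fun v => decide (v ≠ 0)) then (false, "")
  else (true, String.ofList st.2)

-- ===== PRECONDITION & SPEC =====
def Spec_subset_bool (left : String) (right_in : String) (out : Bool × String) : Prop := out = subset_bool_alt left right_in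
instance (left : String) (right_in : String) (out : Bool × String) : Decidable (Spec_subset_bool left right_in out) := by unfold Spec_subset_bool; infer_instance

-- ===== CLAIM (what is proved, stated in full; the proofs are below) =====
def Claim_equal_subset_bool : Prop := ∀ (left : String) (right_in : String), Dom_subset_bool left right_in → Spec_subset_bool left right_in (subset_bool left right_in)

-- ===== LEMMAS AND PROOFS =====

-- the chars of `right` left over once each char c eats its first `n c` occurrences
def keepF (n : Char → Nat) : List Char → List Char
  | [] => []
  | x :: xs => if n x = 0 then x :: keepF n xs else keepF (fun y => if y = x then n x - 1 else n y) xs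

-- the unconsumed needs after that pass
def remF (n : Char → Nat) : List Char → Char → Nat
  | [] => n
  | x :: xs => if n x = 0 then remF n xs else remF (fun y => if y = x then n x - 1 else n y) xs

theorem keepF_cons_zero (n : Char → Nat) (x : Char) (xs : List Char) (h : n x = 0) :
    keepF n (x :: xs) = x :: keepF n xs := by simp [keepF, h]

theorem keepF_cons_pos (n : Char → Nat) (x : Char) (xs : List Char) (h : ¬ n x = 0) :
    keepF n (x :: xs) = keepF (fun y => if y = x then n x - 1 else n y) xs := by simp [keepF, h]

theorem remF_cons_zero (n : Char → Nat) (x : Char) (xs : List Char) (h : n x = 0) :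
    remF n (x :: xs) = remF n xs := by simp [remF, h]

theorem remF_cons_pos (n : Char → Nat) (x : Char) (xs : List Char) (h : ¬ n x = 0) :
    remF n (x :: xs) = remF (fun y => if y = x then n x - 1 else n y) xs := by simp [remF, h]

theorem subst_keepF {n m : Char → Nat} (h : n = m) (xs : List Char) : keepF n xs = keepF m xs := by rw [h]

theorem remF_eq (right : List Char) : ∀ (n : Char → Nat) (c : Char),
    remF n right c = n c - min (n c) (List.count c right) := by
  induction right with
  | nil => intro n c; simp [remF]
  | cons x xs ih =>
    intro n c
    by_cases hx : n x = 0
    · rw [remF_cons_zero n x xs hx, ih]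
      by_cases hc : c = x
      · subst hc; simp [List.count_cons, hx]
      · simp [List.count_cons, show ¬x = c from fun e => hc e.symm]
    · rw [remF_cons_pos n x xs hx, ih]
      by_cases hc : c = x
      · subst hc
        simp only [List.count_cons_self, eq_self_iff_true, if_true]
        omega
      · simp [List.count_cons, hc, show ¬x = c from fun e => hc e.symm]

-- removing the FIRST occurrence of c from right and decrementing its need leaves keepF unchanged
theorem keepF_erase (c : Char) (right : List Char) : ∀ (n : Char → Nat), c ∈ right → 1 ≤ n c →
    keepF n right = keepF (fun y => if y = c then n c - 1 else n y) (right.erase c) := by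
  induction right with
  | nil => intro n h; simp at h
  | cons x xs ih =>
    intro n hmem hn
    by_cases hxc : x = c
    · subst hxc
      rw [List.erase_cons_head, keepF_cons_pos n x xs (by omega)]
    · have hxc' : ¬ c = x := fun e => hxc e.symm
      rw [List.erase_cons_tail (by simp [hxc])]
      have hc : c ∈ xs := by
        rcases List.mem_cons.mp hmem with h | h
        · exact absurd h.symm hxc
        · exact h
      by_cases hx0 : n x = 0
      · rw [keepF_cons_zero n x xs hx0,
            keepF_cons_zero (fun y => if y = c then n c - 1 else n y) x (xs.erase c) (by simp [hxc]; exact hx0),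
            ih n hc hn]
      · rw [keepF_cons_pos n x xs hx0,
            keepF_cons_pos (fun y => if y = c then n c - 1 else n y) x (xs.erase c) (by simpa [hxc] using hx0),
            ih (fun y => if y = x then n x - 1 else n y) hc (by simpa [hxc'] using hn)]
        apply subst_keepF
        funext y
        by_cases h1 : y = x <;> by_cases h2 : y = c
        · exact absurd (h1.symm.trans h2) hxc
        · subst h1; simp [hxc, hxc']
        · subst h2; simp [hxc']
        · simp [h1, h2]

-- take i ++ drop (i+1) at the first occurrence of c IS erase c
theorem take_drop_first (c : Char) (s : List Char) : ∀ (i : Nat), i < s.length → s.drop i = c :: (s.drop (i+1)) →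
    (∀ j, j < i → s[j]? ≠ some c) → s.take i ++ s.drop (i + 1) = s.erase c := by
  induction s with
  | nil => intro i h; simp at h
  | cons x xs ih =>
    intro i hi hdrop hmin
    cases i with
    | zero =>
      simp at hdrop
      subst hdrop
      simp [List.erase_cons_head]
    | succ j =>
      have hx : ¬ x = c := by
        have h0 := hmin 0 (Nat.succ_pos j)
        simpa using h0
      rw [List.erase_cons_tail (by simp [hx])]
      simp only [List.take_succ_cons, List.drop_succ_cons, List.cons_append, List.cons.injEq]
      refine ⟨by trivial, ih j (by simpa using hi) (by simpa using hdrop) ?_⟩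
      intro k hk
      have := hmin (k + 1) (by omega)
      simpa using this

-- the multiset-subset condition steps down through erase of the head
theorem count_cond_erase (l : Char) (ls right : List Char) (hl : l ∈ right) :
    ((∀ c ∈ l :: ls, List.count c (l :: ls) ≤ List.count c right) ↔
      (∀ c ∈ ls, List.count c ls ≤ List.count c (right.erase l))) := by
  have hpos : 1 ≤ List.count l right := List.one_le_count_iff.mpr hl
  constructor
  · intro h c hc
    by_cases hcl : c = l
    · subst hcl
      have hh := h c List.mem_cons_self
      rw [List.count_cons_self] at hh
      rw [List.count_erase_self]
      omega
    · have hh := h c (List.mem_cons_of_mem _ hc)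
      rw [List.count_erase_of_ne hcl]
      simp [List.count_cons, show ¬l = c from fun e => hcl e.symm] at hh
      exact hh
  · intro h c hc
    by_cases hcl : c = l
    · subst hcl
      rw [List.count_cons_self]
      by_cases hls : c ∈ ls
      · have hh := h c hls
        rw [List.count_erase_self] at hh
        omega
      · rw [List.count_eq_zero_of_not_mem hls]
        omega
    · rcases List.mem_cons.mp hc with h' | h'
      · exact absurd h' hcl
      · have hh := h c h'
        rw [List.count_erase_of_ne hcl] at hh
        simp [List.count_cons, show ¬l = c from fun e => hcl e.symm]
        exact hh

-- characterization of A's loop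
theorem subsetLoopA_eq (left : List Char) : ∀ (right : List Char),
    subsetLoopA left right =
      if ∀ c ∈ left, List.count c left ≤ List.count c right
      then (true, keepF (fun c => List.count c left) right) else (false, []) := by
  induction left with
  | nil =>
    intro right
    rw [if_pos (by simp)]
    simp only [subsetLoopA]
    congr 1
    induction right with
    | nil => simp [keepF]
    | cons x xs ih2 =>
      rw [keepF_cons_zero _ x xs (by simp), ← ih2]
  | cons l ls ih =>
    intro right
    by_cases hl : l ∈ right
    · have hinf : [l] <:+: right := by
        rcases List.mem_iff_append.mp hl with ⟨s, t, h⟩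
        exact ⟨s, t, by rw [h]; simp⟩
      have hfind : 0 ≤ PySem.Chars.find right [l] := by
        have h1 : ¬ PySem.Chars.find right [l] = -1 := by
          rw [PySem.Chars.find_eq_neg_one_iff]
          exact fun h => h hinf
        have h2 : -1 ≤ PySem.Chars.find right [l] := PySem.Chars.neg_one_le_find right [l]
        omega
      obtain ⟨hpre, hmin⟩ := PySem.Chars.find_spec (s := right) (sub := [l]) hfind
      set i : Nat := (PySem.Chars.find right [l]).toNat with hidef
      obtain ⟨t, ht⟩ := hpre
      have hilen : i < right.length := by
        have hlen := congrArg List.length ht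
        simp [List.length_drop] at hlen
        omega
      have hdrop2 : right.drop (i + 1) = t := by
        have h3 := congrArg List.tail ht
        simp only [List.tail_drop] at h3
        simpa using h3.symm
      have hdropi : right.drop i = l :: right.drop (i + 1) := by
        rw [hdrop2, ← ht]
        rfl
      have hminj : ∀ j, j < i → right[j]? ≠ some l := by
        intro j hj hget
        apply hmin j hj
        have hjlen : j < right.length := lt_trans hj hilen
        rw [List.getElem?_eq_getElem hjlen] at hget
        have hg : right[j] = l := Option.some.inj hget
        refine ⟨right.drop (j + 1), ?_⟩
        conv_rhs => rw [List.drop_eq_getElem_cons hjlen]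
        rw [hg]
        rfl
      have hicast : PySem.Chars.find right [l] = (i : Int) := by omega
      have hslice : PySem.List.slice right none (some (PySem.Chars.find right [l])) ++
          PySem.List.slice right (some (PySem.Chars.find right [l] + 1)) none = right.erase l := by
        rw [hicast]
        rw [show ((i : Int) + 1) = ((i + 1 : Nat) : Int) from by push_cast; ring]
        rw [PySem.List.slice_to_natCast, PySem.List.slice_from_natCast]
        exact take_drop_first l right i hilen hdropi hminj
      simp only [subsetLoopA]
      rw [if_pos hfind, hslice, ih (right.erase l)]
      rcases Classical.em (∀ c ∈ l :: ls, List.count c (l :: ls) ≤ List.count c right) with h | h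
      · rw [if_pos ((count_cond_erase l ls right hl).mp h), if_pos h]
        have hcnt : 1 ≤ (fun c => List.count c (l :: ls)) l := by
          simp [List.count_cons]
        rw [keepF_erase l right (fun c => List.count c (l :: ls)) hl hcnt]
        have hfun : (fun y => if y = l then List.count l (l :: ls) - 1 else List.count y (l :: ls))
            = (fun c => List.count c ls) := by
          funext y
          by_cases hy : y = l
          · subst hy
            rw [if_pos rfl, List.count_cons_self]
            omega
          · rw [if_neg hy]
            simp [List.count_cons, show ¬l = y from fun e => hy e.symm]
        rw [hfun]
      · rw [if_neg (fun h' => h ((count_cond_erase l ls right hl).mpr h')), if_neg h]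
    · simp only [subsetLoopA]
      have hni : ¬ [l] <:+: right := by
        intro hinf
        rcases hinf with ⟨s, t, hst⟩
        apply hl
        rw [← hst]
        simp
      have hneg : ¬ (0 ≤ PySem.Chars.find right [l]) := by
        have h1 : PySem.Chars.find right [l] = -1 := by
          rw [PySem.Chars.find_eq_neg_one_iff]
          exact hni
        omega
      rw [if_neg hneg]
      rw [if_neg (by
        intro h
        have hh := h l List.mem_cons_self
        rw [List.count_cons_self, List.count_eq_zero_of_not_mem hl] at hh
        omega)]

-- B's step function (definitionally the lambda in subset_bool_alt)
def bStep (st : PySem.Dict Char Int × List Char) (ch : Char) : PySem.Dict Char Int × List Char :=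
  let n := st.1.getD ch 0
  if n ≠ 0 then (st.1.insert ch (n - 1), st.2) else (st.1, st.2 ++ [ch])

-- characterization of B's consumption loop
theorem bLoop_eq (right : List Char) : ∀ (d : PySem.Dict Char Int) (acc : List Char) (n : Char → Nat),
    (∀ c, d.getD c 0 = (n c : Int)) →
    ((right.foldl bStep (d, acc)).2 = acc ++ keepF n right) ∧
    (∀ c, (right.foldl bStep (d, acc)).1.getD c 0 = (remF n right c : Int)) ∧
    ((right.foldl bStep (d, acc)).1.keys = d.keys) := by
  induction right with
  | nil => intro d acc n hv; simp [keepF, remF, hv]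
  | cons x xs ih =>
    intro d acc n hv
    by_cases hx : n x = 0
    · have hm : d.getD x 0 = 0 := by rw [hv]; simp [hx]
      have hstep : bStep (d, acc) x = (d, acc ++ [x]) := by simp [bStep, hm]
      simp only [List.foldl_cons, hstep]
      obtain ⟨h1, h2, h3⟩ := ih d (acc ++ [x]) n hv
      refine ⟨?_, ?_, h3⟩
      · rw [h1, keepF_cons_zero n x xs hx]
        simp
      · intro c
        rw [h2, remF_cons_zero n x xs hx]
    · have hm : d.getD x 0 ≠ 0 := by rw [hv]; simpa using hx
      have hstep : bStep (d, acc) x = (d.insert x (d.getD x 0 - 1), acc) := by simp [bStep, hm]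
      simp only [List.foldl_cons, hstep]
      have hv' : ∀ c, (d.insert x (d.getD x 0 - 1)).getD c 0
          = (((fun y => if y = x then n x - 1 else n y) c : Nat) : Int) := by
        intro c
        rw [PySem.Dict.getD_insert]
        by_cases hc : c = x
        · subst hc
          simp only [eq_self_iff_true, if_true, hv]
          omega
        · rw [if_neg hc]
          simp [hc, hv]
      obtain ⟨h1, h2, h3⟩ := ih (d.insert x (d.getD x 0 - 1)) acc _ hv'
      refine ⟨?_, ?_, ?_⟩
      · rw [h1, keepF_cons_pos n x xs hx]
      · intro c
        rw [h2, remF_cons_pos n x xs hx]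
      · rw [h3]
        apply PySem.Dict.keys_insert_of_contains
        by_cases hcon : d.contains x = true
        · exact hcon
        · have hfalse : d.contains x = false := by simpa using hcon
          exact absurd (PySem.Dict.getD_of_not_contains d 0 hfalse) hm

-- ===== VERDICT (by name: the statement is the Claim_ definition above) =====
theorem subset_bool_spec : Claim_equal_subset_bool := by
  intro left right_in _
  show subset_bool left right_in = subset_bool_alt left right_in
  have hval : ∀ c, (PySem.Dict.counter left.toList).getD c 0 = ((List.count c left.toList : Nat) : Int) := by
    intro c
    simp [PySem.Dict.getD_counter]
  obtain ⟨hout, hrem, hkeys⟩ := bLoop_eq right_in.toList (PySem.Dict.counter left.toList) []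
      (fun c => List.count c left.toList) hval
  have hA : subset_bool left right_in =
      (if ∀ c ∈ left.toList, List.count c left.toList ≤ List.count c right_in.toList
       then (true, String.ofList (keepF (fun c => List.count c left.toList) right_in.toList))
       else (false, String.ofList [])) := by
    simp only [subset_bool, subsetLoopA_eq]
    rcases Classical.em (∀ c ∈ left.toList, List.count c left.toList ≤ List.count c right_in.toList) with h | h
    · simp only [if_pos h]
    · simp only [if_neg h]
  have hB : subset_bool_alt left right_in =
      (if (right_in.toList.foldl bStep (PySem.Dict.counter left.toList, [])).1.values.any (fun v => decide (v ≠ 0))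
       then (false, "")
       else (true, String.ofList (right_in.toList.foldl bStep (PySem.Dict.counter left.toList, [])).2)) := by
    simp only [subset_bool_alt, PySem.Dict.foldl_insert_getD_add_one_eq_counter]
    rfl
  have hk2 : (right_in.toList.foldl bStep (PySem.Dict.counter left.toList, [])).1.keys
      = PySem.Set.ofList left.toList := by
    rw [hkeys, PySem.Dict.keys_counter]
  have hnd : (right_in.toList.foldl bStep (PySem.Dict.counter left.toList, [])).1.keys.Nodup := by
    rw [hk2]
    exact PySem.Set.nodup_ofList _
  have hvals : (right_in.toList.foldl bStep (PySem.Dict.counter left.toList, [])).1.values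
      = (PySem.Set.ofList left.toList).map
          (fun k => ((remF (fun c => List.count c left.toList) right_in.toList k : Nat) : Int)) := by
    rw [PySem.Dict.values_eq_map_keys _ hnd 0, hk2]
    exact List.map_congr_left (fun a _ => hrem a)
  have hanyiff : ((right_in.toList.foldl bStep (PySem.Dict.counter left.toList, [])).1.values.any
        (fun v => decide (v ≠ 0)) = true)
      ↔ ∃ c ∈ left.toList, List.count c right_in.toList < List.count c left.toList := by
    rw [hvals]
    simp only [List.any_map, List.any_eq_true, Function.comp, decide_eq_true_eq,
      PySem.Set.mem_ofList, ne_eq, Int.natCast_eq_zero]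
    constructor
    · rintro ⟨c, hc, hne⟩
      refine ⟨c, hc, ?_⟩
      rw [remF_eq] at hne
      omega
    · rintro ⟨c, hc, hlt⟩
      refine ⟨c, hc, ?_⟩
      rw [remF_eq]
      omega
  rcases Classical.em (∀ c ∈ left.toList, List.count c left.toList ≤ List.count c right_in.toList) with h | h
  · have hfalse : ¬ ((right_in.toList.foldl bStep (PySem.Dict.counter left.toList, [])).1.values.any
        (fun v => decide (v ≠ 0)) = true) := by
      rw [hanyiff]
      rintro ⟨c, hc, hlt⟩
      exact absurd (h c hc) (by omega)
    rw [hA, hB, if_pos h, if_neg hfalse, hout]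
    simp
  · have htrue : ∃ c ∈ left.toList, List.count c right_in.toList < List.count c left.toList := by
      push_neg at h
      obtain ⟨c, hc, hlt⟩ := h
      exact ⟨c, hc, by omega⟩
    rw [hA, hB, if_neg h, if_pos (hanyiff.mpr htrue)]
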